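-- pv_equiv track=rewrite | github.com/rkRashik/DeltaCrown | apps/teams/views/create.py | _get_error_step
-- ===== SOURCE A (Python) =====
-- def _get_error_step(errors):
--     """Map form errors to wizard step numbers."""
--
--     # Step 1: Name, Tag, Tagline
--     if any(field in errors for field in ['name', 'tag', 'tagline']):
--         return 1
--
--     # Step 2-3: Game, Region
--     if any(field in errors for field in ['game', 'region']):
--         return 2
--
--     # Step 4: Branding, Description, Social
--     if any(field in errors for field in ['logo', 'banner_image', 'description', 'twitter', 'instagram', 'discord', 'youtube', 'twitch']):
--         return 4
--
--     # Step 6: Terms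
--     if 'accept_terms' in errors:
--         return 6
--
--     # Default to step 1
--     return 1
-- ===== SOURCE B (Python) =====
-- FIELD_STEP = {
--     'name': 1, 'tag': 1, 'tagline': 1,
--     'game': 2, 'region': 2,
--     'logo': 4, 'banner_image': 4, 'description': 4, 'twitter': 4,
--     'instagram': 4, 'discord': 4, 'youtube': 4, 'twitch': 4,
--     'accept_terms': 6,
-- }
--
--
-- def _get_error_step(errors):
--     """Map form errors to wizard step numbers."""
--     matched = [FIELD_STEP[f] for f in errors if f in FIELD_STEP]
--     return min(matched) if matched else 1
-- ===== Notes on version B (the rewrite author's own statement) =====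
-- stated objective: idiomatic
-- what changed: Replaces the four fixed-group membership scans and early-return chain by a single flat field-to-step table: one pass over the errors collects each field's step and the minimum matched step (or 1 if none) is returned.
import Mathlib
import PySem

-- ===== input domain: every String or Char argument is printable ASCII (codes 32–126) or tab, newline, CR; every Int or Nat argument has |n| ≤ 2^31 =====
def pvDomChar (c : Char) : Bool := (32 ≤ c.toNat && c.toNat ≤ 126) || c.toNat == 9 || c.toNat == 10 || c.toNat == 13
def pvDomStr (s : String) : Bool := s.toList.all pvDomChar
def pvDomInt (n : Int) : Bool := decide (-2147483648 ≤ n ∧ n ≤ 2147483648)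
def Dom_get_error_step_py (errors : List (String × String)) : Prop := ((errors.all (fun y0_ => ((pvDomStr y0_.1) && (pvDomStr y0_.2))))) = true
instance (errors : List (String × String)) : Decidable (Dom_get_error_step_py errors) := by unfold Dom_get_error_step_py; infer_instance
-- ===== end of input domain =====

-- B replaces A's four fixed-group membership scans with an early-return chain by a single
-- flat field→step table scanned once over the errors (minimum matched step, default 1);
-- objective: idiomatic (no speed claim).


-- ===== PORT A =====
-- 'field in errors' on the dict is key membership (assoc list: some pair has that key)
def keyIn (errors : List (String × String)) (f : String) : Bool :=
  errors.any (fun p => p.1 == f)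

def get_error_step_py (errors : List (String × String)) : Int :=
  if ["name", "tag", "tagline"].any (fun f => keyIn errors f) then 1
  else if ["game", "region"].any (fun f => keyIn errors f) then 2
  else if ["logo", "banner_image", "description", "twitter", "instagram",
           "discord", "youtube", "twitch"].any (fun f => keyIn errors f) then 4
  else if keyIn errors "accept_terms" then 6
  else 1

-- ===== PORT B =====
-- the flat dict FIELD_STEP as an association list
def fieldStep : List (String × Int) :=
  [("name", 1), ("tag", 1), ("tagline", 1),
   ("game", 2), ("region", 2),
   ("logo", 4), ("banner_image", 4), ("description", 4), ("twitter", 4),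
   ("instagram", 4), ("discord", 4), ("youtube", 4), ("twitch", 4),
   ("accept_terms", 6)]

-- FIELD_STEP[f] when 'f in FIELD_STEP', else none (the comprehension's filter + lookup)
def stepOf (f : String) : Option Int := fieldStep.lookup f

def get_error_step_py_alt (errors : List (String × String)) : Int :=
  let matched := errors.filterMap (fun p => stepOf p.1)
  match PySem.List.min? matched (fun x => x) with
  | some m => m
  | none => 1

-- ===== PRECONDITION & SPEC =====
def Spec_get_error_step_py (errors : List (String × String)) (out : Int) : Prop := out = get_error_step_py_alt errors
instance (errors : List (String × String)) (out : Int) : Decidable (Spec_get_error_step_py errors out) := by unfold Spec_get_error_step_py; infer_instance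

-- ===== CLAIM (what is proved, stated in full; the proofs are below) =====
def Claim_equal_get_error_step_py : Prop := ∀ (errors : List (String × String)), Dom_get_error_step_py errors → Spec_get_error_step_py errors (get_error_step_py errors)

-- ===== LEMMAS AND PROOFS =====

-- "some error field maps to step s", phrased as one scan over the errors
def hasStep (errors : List (String × String)) (s : Int) : Bool :=
  errors.any (fun p => stepOf p.1 == some s)

lemma stepOf_cases (f : String) :
    stepOf f = none ∨ stepOf f = some 1 ∨ stepOf f = some 2 ∨ stepOf f = some 4 ∨ stepOf f = some 6 := by
  unfold stepOf fieldStep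
  simp only [List.lookup]
  repeat' split
  all_goals simp

lemma stepOf_one_iff (f : String) :
    stepOf f = some 1 ↔ (f = "name" ∨ f = "tag" ∨ f = "tagline") := by
  unfold stepOf fieldStep; simp only [List.lookup]; repeat' split
  all_goals simp_all

lemma stepOf_two_iff (f : String) :
    stepOf f = some 2 ↔ (f = "game" ∨ f = "region") := by
  unfold stepOf fieldStep; simp only [List.lookup]; repeat' split
  all_goals simp_all

lemma stepOf_four_iff (f : String) :
    stepOf f = some 4 ↔ (f = "logo" ∨ f = "banner_image" ∨ f = "description" ∨ f = "twitter" ∨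
      f = "instagram" ∨ f = "discord" ∨ f = "youtube" ∨ f = "twitch") := by
  unfold stepOf fieldStep; simp only [List.lookup]; repeat' split
  all_goals simp_all

lemma stepOf_six_iff (f : String) :
    stepOf f = some 6 ↔ f = "accept_terms" := by
  unfold stepOf fieldStep; simp only [List.lookup]; repeat' split
  all_goals simp_all

-- A's branch conditions, re-expressed as scans over the errors
lemma A_char (errors : List (String × String)) :
    get_error_step_py errors =
      if hasStep errors 1 then 1 else if hasStep errors 2 then 2
      else if hasStep errors 4 then 4 else if hasStep errors 6 then 6 else 1 := by
  have h1 : (["name", "tag", "tagline"].any (fun f => keyIn errors f)) = hasStep errors 1 := by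
    rw [Bool.eq_iff_iff]
    simp only [List.any_eq_true, keyIn, hasStep, beq_iff_eq, stepOf_one_iff, List.mem_cons,
      List.not_mem_nil, or_false]
    constructor
    · rintro ⟨f, hf, p, hp, rfl⟩; exact ⟨p, hp, hf⟩
    · rintro ⟨p, hp, h⟩; exact ⟨p.1, h, p, hp, rfl⟩
  have h2 : (["game", "region"].any (fun f => keyIn errors f)) = hasStep errors 2 := by
    rw [Bool.eq_iff_iff]
    simp only [List.any_eq_true, keyIn, hasStep, beq_iff_eq, stepOf_two_iff, List.mem_cons,
      List.not_mem_nil, or_false]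
    constructor
    · rintro ⟨f, hf, p, hp, rfl⟩; exact ⟨p, hp, hf⟩
    · rintro ⟨p, hp, h⟩; exact ⟨p.1, h, p, hp, rfl⟩
  have h4 : (["logo", "banner_image", "description", "twitter", "instagram",
      "discord", "youtube", "twitch"].any (fun f => keyIn errors f)) = hasStep errors 4 := by
    rw [Bool.eq_iff_iff]
    simp only [List.any_eq_true, keyIn, hasStep, beq_iff_eq, stepOf_four_iff, List.mem_cons,
      List.not_mem_nil, or_false]
    constructor
    · rintro ⟨f, hf, p, hp, rfl⟩; exact ⟨p, hp, hf⟩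
    · rintro ⟨p, hp, h⟩; exact ⟨p.1, h, p, hp, rfl⟩
  have h6 : keyIn errors "accept_terms" = hasStep errors 6 := by
    rw [Bool.eq_iff_iff]
    simp only [List.any_eq_true, keyIn, hasStep, beq_iff_eq, stepOf_six_iff]
  rw [get_error_step_py, h1, h2, h4, h6]

-- foldl min against a seed, in terms of PySem.List.min?
lemma foldl_min_eq (t : List Int) (x : Int) :
    t.foldl min x = match PySem.List.min? t (fun y => y) with
      | none => x
      | some m => min x m := by
  induction t generalizing x with
  | nil => simp [PySem.List.min?]
  | cons a t ih =>
    rw [List.foldl_cons, ih (min x a), PySem.List.min?_id_cons, ih a]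
    cases PySem.List.min? t (fun y => y) with
    | none => simp
    | some m => simp [min_assoc]

lemma hasStep_cons (p : String × String) (rest : List (String × String)) (s : Int) :
    hasStep (p :: rest) s = ((stepOf p.1 == some s) || hasStep rest s) := by
  simp [hasStep]

-- B's min over the matched steps, characterised by the same four scan booleans
lemma B_char (errors : List (String × String)) :
    PySem.List.min? (errors.filterMap (fun p => stepOf p.1)) (fun x => x) =
      if hasStep errors 1 then some 1 else if hasStep errors 2 then some 2
      else if hasStep errors 4 then some 4 else if hasStep errors 6 then some 6 else none := by
  induction errors with
  | nil => simp [PySem.List.min?, hasStep]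
  | cons p rest ih =>
    rcases stepOf_cases p.1 with h | h | h | h | h
    · simp only [List.filterMap_cons, h]
      rw [ih]
      simp only [hasStep_cons, h]
      simp
    all_goals
      simp only [List.filterMap_cons, h]
      rw [PySem.List.min?_id_cons, foldl_min_eq, ih]
      simp only [hasStep_cons, h]
      split_ifs <;> simp_all

-- ===== VERDICT (by name: the statement is the Claim_ definition above) =====
theorem get_error_step_py_spec : Claim_equal_get_error_step_py := by
  intro errors _
  unfold Spec_get_error_step_py
  rw [A_char]
  simp only [get_error_step_py_alt, B_char]
  split_ifs <;> rfl
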